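-- pv_equiv track=rewrite | github.com/computational-metabolomics/beamspy | beams/auxiliary.py | order_composition_by_hill
-- ===== SOURCE A (Python) =====
-- def order_composition_by_hill(composition):
--     symbols = set(composition)
--     if 'C' in symbols:
--         symbols.remove('C')
--         yield 'C'
--         if 'H' in symbols:
--             symbols.remove('H')
--             yield 'H'
--     for symbol in sorted(symbols):
--         yield symbol
-- ===== SOURCE B (Python) =====
-- def order_composition_by_hill(composition):
--     has_c = 'C' in composition
--     if has_c:
--         key = lambda s: (0 if s == 'C' else 1 if s == 'H' else 2, s)
--     else:
--         key = lambda s: (0, s)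
--     ordered = []
--     for s in composition:
--         i = 0
--         while i < len(ordered) and key(ordered[i]) < key(s):
--             i += 1
--         if not (i < len(ordered) and ordered[i] == s):
--             ordered.insert(i, s)
--     yield from ordered
-- ===== Notes on version B (the rewrite author's own statement) =====
-- stated objective: alternative
-- what changed: Replaces build-a-set-then-library-sort-with-C/H-special-cased-yields by a single pass over the mapping that maintains a deduplicated ordered list via priority-keyed ordered insertion (no set(), no sorted() call).
import Mathlib
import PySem

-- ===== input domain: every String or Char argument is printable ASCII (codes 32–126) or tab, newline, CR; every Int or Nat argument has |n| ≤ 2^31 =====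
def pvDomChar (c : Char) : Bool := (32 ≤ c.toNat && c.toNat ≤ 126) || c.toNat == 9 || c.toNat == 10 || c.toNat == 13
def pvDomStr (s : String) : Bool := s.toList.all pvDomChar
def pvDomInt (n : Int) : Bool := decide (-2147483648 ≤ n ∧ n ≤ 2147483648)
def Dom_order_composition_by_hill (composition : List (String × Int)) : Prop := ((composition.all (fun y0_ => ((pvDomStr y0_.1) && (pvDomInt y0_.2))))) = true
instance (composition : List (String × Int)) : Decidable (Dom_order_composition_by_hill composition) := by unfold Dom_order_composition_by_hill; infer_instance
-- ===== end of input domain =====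

-- B replaces A's build-a-set-then-sort control flow with a single pass over the mapping's
-- keys that maintains a deduplicated priority-ordered list by ordered insertion
-- (objective: alternative, no set() and no sorted() call; same return value).

-- ===== PORT A =====
-- symbols = set(composition): the distinct keys of the dict, first-insertion order.
-- 'symbols.remove(x)' is ported as Set.discard, exact here because each remove is
-- guarded by the membership test ('in'), so Python's KeyError is unreachable.
def order_composition_by_hill (composition : List (String × Int)) : List String :=
  let symbols : PySem.Set String := PySem.Set.ofList (composition.map Prod.fst)
  if PySem.Set.contains symbols "C" then
    let symbols := PySem.Set.discard symbols "C"
    if PySem.Set.contains symbols "H" then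
      let symbols := PySem.Set.discard symbols "H"
      "C" :: "H" :: PySem.List.sorted symbols (fun x => x)
    else
      "C" :: PySem.List.sorted symbols (fun x => x)
  else
    PySem.List.sorted symbols (fun x => x)

-- ===== PORT B =====
-- key(s) = (0|1|2, s): the priority tuple B's lambda computes (hasC picks which lambda)
def hillKey (hasC : Bool) (s : String) : Lex (Int × String) :=
  toLex (if hasC then (if s = "C" then (0 : Int) else if s = "H" then 1 else 2) else 0, s)

-- the while-loop + insert of Source B: walk past the entries whose key is smaller,
-- then either skip (duplicate found at the insertion point) or insert s there
def insertOrdered (key : String → Lex (Int × String)) (s : String) : List String → List String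
  | [] => [s]
  | x :: xs =>
    if key x < key s then x :: insertOrdered key s xs
    else if x = s then x :: xs
    else s :: x :: xs

-- single pass: for s in composition (the dict's keys, in order), ordered-insert s
def order_composition_by_hill_alt (composition : List (String × Int)) : List String :=
  let hasC := (composition.map Prod.fst).contains "C"
  (composition.map Prod.fst).foldl (fun ordered s => insertOrdered (hillKey hasC) s ordered) []

-- ===== PRECONDITION & SPEC =====
def Spec_order_composition_by_hill (composition : List (String × Int)) (out : List String) : Prop := out = order_composition_by_hill_alt composition
instance (composition : List (String × Int)) (out : List String) : Decidable (Spec_order_composition_by_hill composition out) := by unfold Spec_order_composition_by_hill; infer_instance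

-- ===== CLAIM (what is proved, stated in full; the proofs are below) =====
def Claim_equal_order_composition_by_hill : Prop := ∀ (composition : List (String × Int)), Dom_order_composition_by_hill composition → Spec_order_composition_by_hill composition (order_composition_by_hill composition)

-- ===== LEMMAS AND PROOFS =====

theorem mem_insertOrdered (key : String → Lex (Int × String)) (s z : String) (l : List String) :
    z ∈ insertOrdered key s l ↔ z = s ∨ z ∈ l := by
  induction l with
  | nil => simp [insertOrdered]
  | cons x xs ih =>
    unfold insertOrdered
    split_ifs with h1 h2 <;> subst_vars <;> simp only [List.mem_cons, ih] <;> tauto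

theorem pairwise_insertOrdered (key : String → Lex (Int × String))
    (hinj : ∀ a b : String, key a = key b → a = b) (s : String) (l : List String)
    (h : l.Pairwise (fun a b => key a < key b)) :
    (insertOrdered key s l).Pairwise (fun a b => key a < key b) := by
  induction l with
  | nil => simp [insertOrdered]
  | cons x xs ih =>
    rw [List.pairwise_cons] at h
    obtain ⟨hx, hxs⟩ := h
    unfold insertOrdered
    split_ifs with h1 h2
    · refine List.pairwise_cons.mpr ⟨?_, ih hxs⟩
      intro y hy
      rcases (mem_insertOrdered key s y xs).mp hy with rfl | hy'
      · exact h1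
      · exact hx y hy'
    · exact List.pairwise_cons.mpr ⟨hx, hxs⟩
    · have hlt : key s < key x := by
        rcases lt_trichotomy (key s) (key x) with h | h | h
        · exact h
        · exact absurd (hinj _ _ h.symm) h2
        · exact absurd h h1
      refine List.pairwise_cons.mpr ⟨?_, List.pairwise_cons.mpr ⟨hx, hxs⟩⟩
      intro y hy
      rcases List.mem_cons.mp hy with rfl | hy'
      · exact hlt
      · exact hlt.trans (hx y hy')

theorem mem_foldl_insertOrdered (key : String → Lex (Int × String)) (L : List String) :
    ∀ (acc : List String) (z : String),
      z ∈ L.foldl (fun ordered s => insertOrdered key s ordered) acc ↔ z ∈ acc ∨ z ∈ L := by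
  induction L with
  | nil => intro acc z; simp
  | cons x xs ih =>
    intro acc z
    simp only [List.foldl_cons, ih, mem_insertOrdered, List.mem_cons]
    tauto

theorem pairwise_foldl_insertOrdered (key : String → Lex (Int × String))
    (hinj : ∀ a b : String, key a = key b → a = b) (L : List String) :
    ∀ (acc : List String), acc.Pairwise (fun a b => key a < key b) →
      (L.foldl (fun ordered s => insertOrdered key s ordered) acc).Pairwise (fun a b => key a < key b) := by
  induction L with
  | nil => intro acc h; simpa using h
  | cons x xs ih =>
    intro acc h
    exact ih _ (pairwise_insertOrdered key hinj x acc h)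

theorem foldl_insertOrdered_eq_sorted (L : List String) (key : String → Lex (Int × String))
    (hinj : ∀ a b : String, key a = key b → a = b) :
    L.foldl (fun ordered s => insertOrdered key s ordered) [] =
      PySem.List.sorted (PySem.Set.ofList L) key := by
  have hpw : (L.foldl (fun ordered s => insertOrdered key s ordered) []).Pairwise
      (fun a b => key a < key b) :=
    pairwise_foldl_insertOrdered key hinj L [] (by simp)
  have hnodup : (L.foldl (fun ordered s => insertOrdered key s ordered) []).Nodup :=
    hpw.imp (fun {a b} h => by rintro rfl; exact lt_irrefl _ h)
  have hperm : (L.foldl (fun ordered s => insertOrdered key s ordered) []).Perm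
      (PySem.Set.ofList L) := by
    rw [List.perm_ext_iff_of_nodup hnodup (PySem.Set.nodup_ofList L)]
    intro z
    rw [mem_foldl_insertOrdered, PySem.Set.mem_ofList]
    simp
  exact (PySem.List.sorted_eq_of_perm_of_pairwise_lt _ _ key hperm hpw).symm

theorem pairwise_lt_of_sorted_nodup (xs : List String) (h : xs.Nodup) :
    (PySem.List.sorted xs (fun x => x)).Pairwise (· < ·) := by
  have hle := PySem.List.sorted_pairwise xs (fun x => x)
  have hne : (PySem.List.sorted xs (fun x => x)).Nodup :=
    (PySem.List.sorted_perm xs (fun x => x) false).symm.nodup h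
  exact (hle.and hne).imp (fun ⟨h1, h2⟩ => lt_of_le_of_ne h1 h2)

theorem hillKey_inj (hasC : Bool) : ∀ a b : String, hillKey hasC a = hillKey hasC b → a = b := by
  intro a b h
  have := congrArg (fun x => (ofLex x).2) h
  simpa [hillKey] using this

-- A's yield-C/H-then-sort-the-rest output is exactly the whole symbol set sorted by hillKey true
theorem a_eq_sorted_hillKey (composition : List (String × Int)) :
    order_composition_by_hill composition =
      PySem.List.sorted (PySem.Set.ofList (composition.map Prod.fst))
        (hillKey ((composition.map Prod.fst).contains "C")) := by
  unfold order_composition_by_hill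
  set L := composition.map Prod.fst with hL
  set S : PySem.Set String := PySem.Set.ofList L with hS
  have hnodup : S.Nodup := PySem.Set.nodup_ofList L
  have hmemLC : ("C" ∈ L) ↔ ("C" ∈ S) := (PySem.Set.mem_ofList L "C").symm
  by_cases hC : "C" ∈ S
  · have hcont : PySem.Set.contains S "C" = true := by
      rw [PySem.Set.contains_iff]; exact hC
    have hCL : "C" ∈ L := hmemLC.mpr hC
    have hkey : hillKey (L.contains "C") =
        fun s => toLex (if s = "C" then (0 : Int) else if s = "H" then 1 else 2, s) := by
      funext s; simp [hillKey, hCL]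
    simp only [hcont, if_true, hkey]
    by_cases hH : "H" ∈ PySem.Set.discard S "C"
    · have hcontH : PySem.Set.contains (PySem.Set.discard S "C") "H" = true := by
        rw [PySem.Set.contains_iff]; exact hH
      simp only [hcontH, if_true]
      set T := PySem.Set.discard (PySem.Set.discard S "C") "H" with hT
      have hTnodup : T.Nodup :=
        PySem.Set.nodup_discard _ _ (PySem.Set.nodup_discard _ _ hnodup)
      have hmemT : ∀ z, z ∈ T ↔ z ∈ S ∧ z ≠ "C" ∧ z ≠ "H" := by
        intro z
        rw [hT, PySem.Set.mem_discard, PySem.Set.mem_discard]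
        tauto
      set R := PySem.List.sorted T (fun x => x) with hR
      have hRperm : R.Perm T := PySem.List.sorted_perm T (fun x => x) false
      have hmemR : ∀ z, z ∈ R ↔ z ∈ S ∧ z ≠ "C" ∧ z ≠ "H" := by
        intro z; rw [hRperm.mem_iff]; exact hmemT z
      symm
      apply PySem.List.sorted_eq_of_perm_of_pairwise_lt
      · -- ("C" :: "H" :: R).Perm S
        rw [List.perm_ext_iff_of_nodup _ hnodup]
        · intro z
          simp only [List.mem_cons, hmemR z]
          constructor
          · rintro (rfl | rfl | ⟨hz, _⟩)
            · exact hC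
            · exact ((PySem.Set.mem_discard _ _ _).mp hH).1
            · exact hz
          · intro hz
            by_cases h1 : z = "C"
            · exact Or.inl h1
            · by_cases h2 : z = "H"
              · exact Or.inr (Or.inl h2)
              · exact Or.inr (Or.inr ⟨hz, h1, h2⟩)
        · -- nodup of "C" :: "H" :: R
          refine List.nodup_cons.mpr ⟨?_, List.nodup_cons.mpr ⟨?_, hRperm.symm.nodup hTnodup⟩⟩
          · intro hmem
            rcases List.mem_cons.mp hmem with h | h
            · exact absurd h (by decide)
            · exact ((hmemR _).mp h).2.1 rfl
          · intro h
            exact ((hmemR _).mp h).2.2 rfl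
      · -- Pairwise strict under the key
        have hRlt : R.Pairwise (· < ·) := pairwise_lt_of_sorted_nodup T hTnodup
        refine List.pairwise_cons.mpr ⟨?_, List.pairwise_cons.mpr ⟨?_, ?_⟩⟩
        · intro z hz
          rcases List.mem_cons.mp hz with rfl | h
          · show toLex ((0 : Int), "C") < toLex (1, "H"); rw [Prod.Lex.lt_iff]; left; norm_num
          · obtain ⟨_, h1, h2⟩ := (hmemR _).mp h
            show toLex ((0 : Int), "C") < toLex (if z = "C" then (0 : Int) else if z = "H" then 1 else 2, z)
            rw [if_neg h1, if_neg h2, Prod.Lex.lt_iff]; left; norm_num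
        · intro z hz
          obtain ⟨_, h1, h2⟩ := (hmemR _).mp hz
          show toLex ((1 : Int), "H") < toLex (if z = "C" then (0 : Int) else if z = "H" then 1 else 2, z)
          rw [if_neg h1, if_neg h2, Prod.Lex.lt_iff]; left; norm_num
        · refine hRlt.imp_of_mem ?_
          intro a b ha hb hab
          obtain ⟨_, ha1, ha2⟩ := (hmemR _).mp ha
          obtain ⟨_, hb1, hb2⟩ := (hmemR _).mp hb
          show toLex (if a = "C" then (0 : Int) else if a = "H" then 1 else 2, a) <
               toLex (if b = "C" then (0 : Int) else if b = "H" then 1 else 2, b)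
          rw [if_neg ha1, if_neg ha2, if_neg hb1, if_neg hb2, Prod.Lex.lt_iff]
          right; exact ⟨rfl, hab⟩
    · have hcontH : PySem.Set.contains (PySem.Set.discard S "C") "H" = false := by
        rw [← Bool.not_eq_true, PySem.Set.contains_iff]; exact hH
      simp only [hcontH, Bool.false_eq_true, if_false]
      set T := PySem.Set.discard S "C" with hT
      have hTnodup : T.Nodup := PySem.Set.nodup_discard _ _ hnodup
      set R := PySem.List.sorted T (fun x => x) with hR
      have hRperm : R.Perm T := PySem.List.sorted_perm T (fun x => x) false
      have hmemR : ∀ z, z ∈ R ↔ z ∈ S ∧ z ≠ "C" := by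
        intro z; rw [hRperm.mem_iff, hT, PySem.Set.mem_discard]
      have hHnotR : ∀ z ∈ R, z ≠ "H" := by
        intro z hz rfl
        obtain ⟨h1, h2⟩ := (hmemR _).mp hz
        exact hH ((PySem.Set.mem_discard _ _ _).mpr ⟨h1, h2⟩)
      symm
      apply PySem.List.sorted_eq_of_perm_of_pairwise_lt
      · rw [List.perm_ext_iff_of_nodup _ hnodup]
        · intro z
          simp only [List.mem_cons, hmemR z]
          constructor
          · rintro (rfl | ⟨hz, _⟩)
            · exact hC
            · exact hz
          · intro hz
            by_cases h1 : z = "C"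
            · exact Or.inl h1
            · exact Or.inr ⟨hz, h1⟩
        · refine List.nodup_cons.mpr ⟨?_, hRperm.symm.nodup hTnodup⟩
          intro h; exact ((hmemR _).mp h).2 rfl
      · have hRlt : R.Pairwise (· < ·) := pairwise_lt_of_sorted_nodup T hTnodup
        refine List.pairwise_cons.mpr ⟨?_, ?_⟩
        · intro z hz
          obtain ⟨_, h1⟩ := (hmemR _).mp hz
          have h2 := hHnotR z hz
          show toLex ((0 : Int), "C") < toLex (if z = "C" then (0 : Int) else if z = "H" then 1 else 2, z)
          rw [if_neg h1, if_neg h2, Prod.Lex.lt_iff]; left; norm_num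
        · refine hRlt.imp_of_mem ?_
          intro a b ha hb hab
          rw [if_neg ((hmemR _).mp ha).2, if_neg (hHnotR a ha),
              if_neg ((hmemR _).mp hb).2, if_neg (hHnotR b hb), Prod.Lex.lt_iff]
          right; exact ⟨rfl, hab⟩
  · have hcont : PySem.Set.contains S "C" = false := by
      rw [← Bool.not_eq_true, PySem.Set.contains_iff]; exact hC
    have hCL : "C" ∉ L := fun h => hC (hmemLC.mp h)
    have hkey : hillKey (L.contains "C") = fun s => toLex ((0 : Int), s) := by
      funext s; simp [hillKey, hCL]
    simp only [hcont, Bool.false_eq_true, if_false, hkey]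
    symm
    apply PySem.List.sorted_eq_of_perm_of_pairwise_lt
    · exact PySem.List.sorted_perm S (fun x => x) false
    · have hlt := PySem.List.sorted_ofList_pairwise_lt L
      refine hlt.imp ?_
      intro a b hab
      show toLex ((0 : Int), a) < toLex ((0 : Int), b)
      rw [Prod.Lex.lt_iff]
      right; exact ⟨rfl, hab⟩

-- ===== VERDICT (by name: the statement is the Claim_ definition above) =====
theorem order_composition_by_hill_spec : Claim_equal_order_composition_by_hill := by
  intro composition _
  unfold Spec_order_composition_by_hill order_composition_by_hill_alt
  rw [foldl_insertOrdered_eq_sorted _ _ (hillKey_inj _)]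
  exact a_eq_sorted_hillKey composition
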